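-- pv_equiv track=rewrite | github.com/choinara0/Algorithm | Programmer/Level 2/전화번호 목록/전화번호 목록2.py | solution
-- ===== SOURCE A (Python) =====
-- def solution(phone_book):
--     answer = True
--     hash = {}
--
--     for phone_num in phone_book:
--         hash[phone_num] = 1
--
--     for phone_num in phone_book:
--         temp = ''
--         for num in phone_num:
--             temp += num
--             if temp in hash and temp != phone_num:
--                 answer = False
--                 break
--
--     return answer
-- ===== SOURCE B (Python) =====
-- def solution(phone_book):
--     book = sorted(phone_book)
--     for a, b in zip(book, book[1:]):
--         if 0 < len(a) < len(b) and b.startswith(a):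
--             return False
--     return True
-- ===== Notes on version B (the rewrite author's own statement) =====
-- stated objective: idiomatic
-- what changed: Replaces the hash-set of all numbers plus a per-character prefix scan of every number by the canonical sort-then-adjacent-neighbour scan: sort a copy of phone_book and report False exactly when some adjacent pair (a,b) has a as a nonempty, strictly shorter prefix of b (matching A, which never tests the empty prefix).
import Mathlib
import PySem

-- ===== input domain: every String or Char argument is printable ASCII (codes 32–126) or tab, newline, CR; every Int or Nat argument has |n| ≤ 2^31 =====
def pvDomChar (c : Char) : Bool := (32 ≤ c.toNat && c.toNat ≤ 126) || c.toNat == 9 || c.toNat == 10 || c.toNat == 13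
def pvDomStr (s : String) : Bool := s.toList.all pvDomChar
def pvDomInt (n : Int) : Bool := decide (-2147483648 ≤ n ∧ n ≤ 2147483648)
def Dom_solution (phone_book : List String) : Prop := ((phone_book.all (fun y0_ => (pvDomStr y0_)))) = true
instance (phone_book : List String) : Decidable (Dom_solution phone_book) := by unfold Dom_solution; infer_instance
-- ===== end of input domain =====

-- B replaces A's hash-of-all-numbers plus per-character prefix scan by the idiomatic
-- sort-then-adjacent-neighbour scan ('some nonempty number properly prefixes another').

-- ===== PORT A =====
-- Python's dict is keyed by the str values; the port keys it by their .toList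
-- (String.toList is injective, so every membership test agrees exactly).
-- inner 'for num in phone_num' loop: temp accumulates the prefix, 'break' = stop recursing.
def solutionInner (hash : PySem.Dict (List Char) Int) (pn : List Char) :
    List Char → List Char → Bool → Bool
  | _temp, [], answer => answer
  | temp, c :: rest, answer =>
    let temp' := temp ++ [c]
    if hash.contains temp' && !(temp' == pn) then false
    else solutionInner hash pn temp' rest answer

def solution (phone_book : List String) : Bool :=
  let hash := phone_book.foldl (fun d p => d.insert p.toList (1 : Int)) PySem.Dict.empty
  phone_book.foldl (fun answer pn => solutionInner hash pn.toList [] pn.toList answer) true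

-- ===== PORT B =====
-- 'for a, b in zip(book, book[1:])' with early 'return False': recursion over adjacent pairs.
def solutionAdj : List String → Bool
  | a :: b :: rest =>
    if (decide (0 < PySem.Str.len a) && decide (PySem.Str.len a < PySem.Str.len b)) &&
        PySem.Str.startswith b a then false
    else solutionAdj (b :: rest)
  | _ => true

def solution_alt (phone_book : List String) : Bool :=
  solutionAdj (PySem.List.sorted phone_book (fun x => x) false)

-- ===== PRECONDITION & SPEC =====
def Spec_solution (phone_book : List String) (out : Bool) : Prop := out = solution_alt phone_book
instance (phone_book : List String) (out : Bool) : Decidable (Spec_solution phone_book out) := by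
  unfold Spec_solution; infer_instance

-- ===== CLAIM (what is proved, stated in full; the proofs are below) =====
def Claim_equal_solution : Prop := ∀ (phone_book : List String), Dom_solution phone_book →
  Spec_solution phone_book (solution phone_book)

-- ===== LEMMAS AND PROOFS =====

-- "some nonempty number of the book is a proper prefix of another number of the book"
def Bad (phone_book : List String) : Prop :=
  ∃ a ∈ phone_book, ∃ b ∈ phone_book, a.toList ≠ [] ∧ a.toList <+: b.toList ∧ a ≠ b

-- ---- generic facts about the lexicographic order on List Char ----

theorem lexCons_lt_inv {x y : Char} {p c : List Char}
    (h : (x :: p) < (y :: c)) : x < y ∨ (x = y ∧ p < c) := by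
  cases h with
  | cons h' => exact Or.inr ⟨rfl, h'⟩
  | rel h' => exact Or.inl h'

theorem lexCons_le_inv {x y : Char} {p c : List Char}
    (h : (x :: p) ≤ (y :: c)) : x < y ∨ (x = y ∧ p ≤ c) := by
  rcases le_iff_lt_or_eq.mp h with hlt | heq
  · rcases lexCons_lt_inv hlt with h1 | ⟨h1, h2⟩
    · exact Or.inl h1
    · exact Or.inr ⟨h1, le_of_lt h2⟩
  · injection heq with h1 h2
    exact Or.inr ⟨h1, le_of_eq h2⟩

theorem lexCons_not_le_nil {x : Char} {p : List Char} (h : (x :: p) ≤ ([] : List Char)) :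
    False := by
  rcases le_iff_lt_or_eq.mp h with hlt | heq
  · cases hlt
  · simp at heq

theorem le_of_prefix {p b : List Char} (h : p <+: b) : p ≤ b := by
  induction p generalizing b with
  | nil =>
    rcases b with _ | ⟨y, b⟩
    · exact le_rfl
    · exact le_of_lt (List.Lex.nil)
  | cons x p ih =>
    rcases b with _ | ⟨y, b⟩
    · simp at h
    · rcases List.cons_prefix_cons.mp h with ⟨rfl, h2⟩
      exact List.cons_le_cons x (ih h2)

theorem lt_of_proper_prefix {p b : List Char} (h : p <+: b) (hne : p ≠ b) : p < b :=
  lt_of_le_of_ne (le_of_prefix h) hne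

-- a string lexicographically between a prefix p of b and b itself also has p as a prefix
theorem prefix_of_between : ∀ (p c b : List Char), p <+: b → p ≤ c → c ≤ b → p <+: c := by
  intro p
  induction p with
  | nil => intro c b _ _ _; exact List.nil_prefix
  | cons x p ih =>
    intro c b hpb hpc hcb
    rcases b with _ | ⟨z, b⟩
    · simp at hpb
    rcases List.cons_prefix_cons.mp hpb with ⟨rfl, hpb'⟩
    rcases c with _ | ⟨y, c⟩
    · exact absurd hpc lexCons_not_le_nil
    rcases lexCons_le_inv hpc with h1 | ⟨h1, hpc'⟩
    · rcases lexCons_le_inv hcb with h2 | ⟨h2, _⟩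
      · exact absurd (h1.trans h2) (lt_irrefl _)
      · subst h2; exact absurd h1 (lt_irrefl _)
    · subst h1
      rcases lexCons_le_inv hcb with h2 | ⟨_, hcb'⟩
      · exact absurd h2 (lt_irrefl _)
      · exact List.cons_prefix_cons.mpr ⟨rfl, ih c b hpb' hpc' hcb'⟩

-- ---- characterisation of port A ----

-- the trigger test of A's inner loop
def Trig (hash : PySem.Dict (List Char) Int) (pn t : List Char) : Prop :=
  hash.contains t = true ∧ t ≠ pn

theorem solutionInner_false_iff (hash : PySem.Dict (List Char) Int) (pn : List Char) :
    ∀ (rest temp : List Char) (answer : Bool),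
      solutionInner hash pn temp rest answer = false ↔
        answer = false ∨ ∃ q, q ≠ [] ∧ q <+: rest ∧ Trig hash pn (temp ++ q) := by
  intro rest
  induction rest with
  | nil =>
    intro temp answer
    simp only [solutionInner]
    constructor
    · intro h; exact Or.inl h
    · rintro (h | ⟨q, hq, hpre, _⟩)
      · exact h
      · exact absurd (List.prefix_nil.mp hpre) hq
  | cons c rest ih =>
    intro temp answer
    simp only [solutionInner]
    by_cases htr : Trig hash pn (temp ++ [c])
    · have hb : (hash.contains (temp ++ [c]) && !(temp ++ [c] == pn)) = true := by
        rcases htr with ⟨h1, h2⟩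
        simp [h1, h2]
      rw [if_pos hb]
      constructor
      · intro _
        exact Or.inr ⟨[c], by simp, ⟨rest, rfl⟩, htr⟩
      · intro _; rfl
    · have hb : ¬ ((hash.contains (temp ++ [c]) && !(temp ++ [c] == pn)) = true) := by
        intro h
        rw [Bool.and_eq_true, Bool.not_eq_true', beq_eq_false_iff_ne] at h
        exact htr ⟨h.1, h.2⟩
      rw [if_neg hb]
      rw [ih (temp ++ [c]) answer]
      constructor
      · rintro (h | ⟨q, hq, hpre, htrig⟩)
        · exact Or.inl h
        · refine Or.inr ⟨c :: q, by simp, ?_, ?_⟩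
          · rcases hpre with ⟨s, hs⟩
            exact ⟨s, by rw [← hs]; simp⟩
          · have e : temp ++ c :: q = temp ++ [c] ++ q := by simp
            rw [e]; exact htrig
      · rintro (h | ⟨q, hq, hpre, htrig⟩)
        · exact Or.inl h
        · rcases q with _ | ⟨c', q⟩
          · exact absurd rfl hq
          · rcases List.cons_prefix_cons.mp hpre with ⟨rfl, hpre'⟩
            rcases q with _ | ⟨c'', q⟩
            · exact absurd (by simpa using htrig) htr
            · refine Or.inr ⟨c'' :: q, by simp, hpre', ?_⟩
              have e : temp ++ [c'] ++ c'' :: q = temp ++ c' :: c'' :: q := by simp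
              rw [e]; exact htrig

theorem foldl_inner_false_iff (hash : PySem.Dict (List Char) Int) (l : List String) :
    ∀ ans : Bool,
      l.foldl (fun answer pn => solutionInner hash pn.toList [] pn.toList answer) ans = false ↔
        ans = false ∨ ∃ b ∈ l, ∃ q, q ≠ [] ∧ q <+: b.toList ∧ Trig hash b.toList q := by
  induction l with
  | nil => intro ans; simp
  | cons s l ih =>
    intro ans
    simp only [List.foldl_cons]
    rw [ih]
    constructor
    · rintro (h | ⟨b, hbmem, hq⟩)
      · rw [solutionInner_false_iff] at h
        rcases h with h | ⟨q, h1, h2, h3⟩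
        · exact Or.inl h
        · exact Or.inr ⟨s, List.mem_cons_self .., q, h1, h2, by simpa using h3⟩
      · exact Or.inr ⟨b, List.mem_cons_of_mem _ hbmem, hq⟩
    · rintro (h | ⟨b, hbmem, q, h1, h2, h3⟩)
      · exact Or.inl ((solutionInner_false_iff hash s.toList s.toList [] ans).mpr (Or.inl h))
      · rcases List.mem_cons.mp hbmem with rfl | hbmem'
        · exact Or.inl ((solutionInner_false_iff hash b.toList b.toList [] ans).mpr
            (Or.inr ⟨q, h1, h2, by simpa using h3⟩))
        · exact Or.inr ⟨b, hbmem', q, h1, h2, h3⟩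

theorem hashContains (phone_book : List String) (k : List Char) :
    ((phone_book.foldl (fun d p => d.insert p.toList (1 : Int)) PySem.Dict.empty).contains k
      = true) ↔ ∃ a ∈ phone_book, a.toList = k := by
  rw [PySem.Dict.contains_iff_mem_keys,
    PySem.Dict.keys_foldl_insert_key phone_book String.toList (fun _ _ => (1 : Int)) _,
    PySem.Dict.keys_empty, PySem.Set.update_nil_left, PySem.Set.mem_ofList]
  simp [List.mem_map]

theorem solution_false_iff (phone_book : List String) :
    solution phone_book = false ↔
      ∃ b ∈ phone_book, ∃ q, q ≠ [] ∧ q <+: b.toList ∧ q ≠ b.toList ∧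
        (∃ a ∈ phone_book, a.toList = q) := by
  simp only [solution]
  rw [foldl_inner_false_iff]
  constructor
  · rintro (h | ⟨b, hb, q, h1, h2, h3⟩)
    · exact absurd h (by simp)
    · exact ⟨b, hb, q, h1, h2, h3.2, (hashContains phone_book q).mp h3.1⟩
  · rintro ⟨b, hb, q, h1, h2, h3, h4⟩
    exact Or.inr ⟨b, hb, q, h1, h2, (hashContains phone_book q).mpr h4, h3⟩

-- ---- characterisation of port B ----

-- the adjacent-pair test of B, from a proper-prefix pair
theorem adjCond_true {a b : String} (hnil : a.toList ≠ [])
    (hpre : a.toList <+: b.toList) (hne : a ≠ b) :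
    ((decide (0 < PySem.Str.len a) && decide (PySem.Str.len a < PySem.Str.len b)) &&
      PySem.Str.startswith b a) = true := by
  have hlt : a.toList.length < b.toList.length := by
    rcases lt_or_eq_of_le hpre.length_le with h | h
    · exact h
    · exact absurd (String.toList_inj.mp (hpre.eq_of_length h)) hne
  have hsw : PySem.Chars.startswith b.toList a.toList = true :=
    (PySem.Chars.startswith_iff b.toList a.toList).mpr hpre
  have h0 : decide (0 < PySem.Str.len a) = true := by
    rw [decide_eq_true_eq, PySem.Str.len_eq]
    have : 0 < a.toList.length := List.length_pos_of_ne_nil hnil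
    exact_mod_cast this
  have h1 : decide (PySem.Str.len a < PySem.Str.len b) = true := by
    rw [decide_eq_true_eq, PySem.Str.len_eq, PySem.Str.len_eq]
    exact_mod_cast hlt
  rw [Bool.and_eq_true, Bool.and_eq_true]
  exact ⟨⟨h0, h1⟩, by rw [PySem.Str.startswith_eq]; exact hsw⟩

theorem solutionAdj_false_imp : ∀ L : List String, solutionAdj L = false →
    ∃ a ∈ L, ∃ b ∈ L, a.toList ≠ [] ∧ a.toList <+: b.toList ∧ a ≠ b
  | [] => by simp [solutionAdj]
  | [a] => by simp [solutionAdj]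
  | a :: b :: rest => by
    intro h
    simp only [solutionAdj] at h
    by_cases hc : ((decide (0 < PySem.Str.len a) && decide (PySem.Str.len a < PySem.Str.len b)) &&
        PySem.Str.startswith b a) = true
    · rw [Bool.and_eq_true, Bool.and_eq_true, decide_eq_true_eq, decide_eq_true_eq] at hc
      have hpre : a.toList <+: b.toList :=
        (PySem.Chars.startswith_iff b.toList a.toList).mp (by
          rw [← PySem.Str.startswith_eq]; exact hc.2)
      have hnil : a.toList ≠ [] := by
        have := hc.1.1
        rw [PySem.Str.len_eq] at this
        intro e
        rw [e] at this
        simp at this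
      have hlen : a.toList.length < b.toList.length := by
        have := hc.1.2
        rw [PySem.Str.len_eq, PySem.Str.len_eq] at this
        exact_mod_cast this
      have hne : a ≠ b := by
        intro e; subst e; exact absurd hlen (lt_irrefl _)
      exact ⟨a, by simp, b, by simp, hnil, hpre, hne⟩
    · rw [if_neg hc] at h
      rcases solutionAdj_false_imp (b :: rest) h with ⟨x, hx, y, hy, hn, hp, hne⟩
      exact ⟨x, List.mem_cons_of_mem _ hx, y, List.mem_cons_of_mem _ hy, hn, hp, hne⟩

theorem ne_of_toList_proper {a b : String} (hne : a ≠ b) :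
    a.toList ≠ b.toList := fun e => hne (String.toList_inj.mp e)

theorem solutionAdj_false_of_bad : ∀ L : List String, L.Pairwise (· ≤ ·) →
    ∀ a b : String, a ∈ L → b ∈ L → a.toList ≠ [] → a.toList <+: b.toList → a ≠ b →
      solutionAdj L = false := by
  intro L
  induction L with
  | nil => intro _ a b ha; simp at ha
  | cons x t ih =>
    intro hpw a b ha hb hnil hpre hne
    rcases List.pairwise_cons.mp hpw with ⟨hxall, hpwt⟩
    -- b cannot be x: anything that properly prefixes an element of x :: t is ≥ x impossible
    have hbne_x : b ≠ x ∨ a ∉ t := by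
      by_cases hbx : b = x
      · right
        intro hat
        have hxa : x ≤ a := hxall a hat
        have hax : a < x := by
          rw [String.lt_iff_toList_lt]
          exact lt_of_proper_prefix (hbx ▸ hpre) (ne_of_toList_proper (hbx ▸ hne))
        exact absurd hxa (not_le_of_gt hax)
      · left; exact hbx
    rcases t with _ | ⟨y, t'⟩
    · -- L = [x]
      simp only [List.mem_singleton] at ha hb
      subst ha; subst hb; exact absurd rfl hne
    · simp only [solutionAdj]
      by_cases hc : ((decide (0 < PySem.Str.len x) && decide (PySem.Str.len x < PySem.Str.len y))
          && PySem.Str.startswith y x) = true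
      · rw [if_pos hc]
      · rw [if_neg hc]
        -- exhibit a proper-prefix pair inside y :: t'
        rcases List.mem_cons.mp ha with rfl | hat
        · -- the short string a is the head x
          rcases List.mem_cons.mp hb with rfl | hbt
          · exact absurd rfl hne
          · -- b ∈ y :: t'
            rcases List.mem_cons.mp hbt with rfl | hbt'
            · -- b = y : the head pair already triggers, contradicting hc
              exact absurd (adjCond_true hnil hpre hne) hc
            · -- b ∈ t' : x ≤ y ≤ b, so x.toList prefixes y.toList
              have hxy : a ≤ y := hxall y (List.mem_cons_self ..)
              have hyb : y ≤ b :=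
                (List.pairwise_cons.mp hpwt).1 b hbt'
              have hpy : a.toList <+: y.toList :=
                prefix_of_between a.toList y.toList b.toList hpre
                  (String.le_iff_toList_le.mp hxy) (String.le_iff_toList_le.mp hyb)
              by_cases hay : a = y
              · -- a equals the next element: recurse with a := y
                subst hay
                exact ih hpwt a b (List.mem_cons_self ..) hbt hnil hpre hne
              · exact absurd (adjCond_true hnil hpy hay) hc
        · -- a ∈ t = y :: t'; then b ∈ t as well
          rcases hbne_x with hbx | hnat
          · rcases List.mem_cons.mp hb with rfl | hbt
            · exact absurd rfl hbx
            · exact ih hpwt a b hat hbt hnil hpre hne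
          · exact absurd hat hnat

theorem solution_alt_false_iff (phone_book : List String) :
    solution_alt phone_book = false ↔ Bad phone_book := by
  unfold solution_alt
  have hperm := PySem.List.sorted_perm phone_book (fun x => x) false
  constructor
  · intro h
    rcases solutionAdj_false_imp _ h with ⟨a, ha, b, hb, hn, hp, hne⟩
    exact ⟨a, hperm.mem_iff.mp ha, b, hperm.mem_iff.mp hb, hn, hp, hne⟩
  · rintro ⟨a, ha, b, hb, hn, hp, hne⟩
    have hpw : (PySem.List.sorted phone_book (fun x => x) false).Pairwise (· ≤ ·) := by
      simpa using PySem.List.sorted_pairwise phone_book (fun x => x)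
    exact solutionAdj_false_of_bad _ hpw a b (hperm.mem_iff.mpr ha) (hperm.mem_iff.mpr hb)
      hn hp hne

-- ---- putting the two characterisations together ----

theorem solution_false_iff_bad (phone_book : List String) :
    solution phone_book = false ↔ Bad phone_book := by
  rw [solution_false_iff]
  constructor
  · rintro ⟨b, hb, q, h1, h2, h3, a, ha, rfl⟩
    exact ⟨a, ha, b, hb, h1, h2, fun e => h3 (by rw [e])⟩
  · rintro ⟨a, ha, b, hb, hn, hp, hne⟩
    exact ⟨b, hb, a.toList, hn, hp, ne_of_toList_proper hne, a, ha, rfl⟩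

-- ===== VERDICT (by name: the statement is the Claim_ definition above) =====
theorem solution_spec : Claim_equal_solution := by
  intro phone_book _hdom
  unfold Spec_solution
  by_cases hbad : Bad phone_book
  · rw [(solution_false_iff_bad phone_book).mpr hbad,
      (solution_alt_false_iff phone_book).mpr hbad]
  · have h1 : solution phone_book ≠ false :=
      fun h => hbad ((solution_false_iff_bad phone_book).mp h)
    have h2 : solution_alt phone_book ≠ false :=
      fun h => hbad ((solution_alt_false_iff phone_book).mp h)
    rw [Bool.ne_false_iff] at h1 h2
    rw [h1, h2]
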